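-- pv_equiv track=rewrite | github.com/Alexander-Berg/2022-tests-examples-2 | Taxi/test_taxi_driver_metrics/test_activity_calculation_helpers.py | _compare_activity_change_values
-- ===== SOURCE A (Python) =====
-- import typing as tp
--
-- def _compare_activity_change_values(
--         old: tp.Dict[str, int], new: tp.Dict[str, int],
-- ) -> bool:
--     """ Return True only if all values are equal (None is zero) """
--     for code in new.keys() | old.keys():
--         old_change = old.get(code) or 0
--         new_change = new.get(code) or 0
--         if old_change != new_change:
--             return False
--     return True
-- ===== SOURCE B (Python) =====
-- import typing as tp
--
-- def _compare_activity_change_values(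
--         old: tp.Dict[str, int], new: tp.Dict[str, int],
-- ) -> bool:
--     """ Return True only if all values are equal (None is zero) """
--     norm_old = {k: v for k, v in old.items() if v}
--     norm_new = {k: v for k, v in new.items() if v}
--     return norm_old == norm_new
-- ===== Notes on version B (the rewrite author's own statement) =====
-- stated objective: simpler
-- what changed: Replaces the explicit scan over the union of key sets with per-key get/or-0/compare by normalizing both dicts (dropping falsy zero entries) and delegating the whole comparison to dict equality in one statement.
import Mathlib
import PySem

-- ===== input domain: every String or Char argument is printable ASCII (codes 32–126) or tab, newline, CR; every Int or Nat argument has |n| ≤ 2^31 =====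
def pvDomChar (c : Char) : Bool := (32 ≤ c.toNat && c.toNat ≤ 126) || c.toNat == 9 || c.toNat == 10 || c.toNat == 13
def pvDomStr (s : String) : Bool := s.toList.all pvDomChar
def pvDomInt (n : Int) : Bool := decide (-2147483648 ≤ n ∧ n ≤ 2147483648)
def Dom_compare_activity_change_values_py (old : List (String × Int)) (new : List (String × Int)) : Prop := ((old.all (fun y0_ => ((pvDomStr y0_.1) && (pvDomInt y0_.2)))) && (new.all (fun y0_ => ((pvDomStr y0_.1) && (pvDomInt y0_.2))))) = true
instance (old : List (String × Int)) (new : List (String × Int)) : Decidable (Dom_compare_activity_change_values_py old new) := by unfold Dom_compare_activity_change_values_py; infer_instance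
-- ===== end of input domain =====

-- B normalizes both dicts by dropping zero values and compares them as dicts, instead of
-- A's explicit scan over the union of key sets with per-key get/or-0/compare (objective: simpler).


-- ===== PORT A =====
-- `x or 0` applied to an Optional int (dict .get): None and 0 both become 0
def pyOrZero (o : Option Int) : Int :=
  match o with
  | some v => if v = 0 then 0 else v
  | none => 0

def compare_activity_change_values_py (old : List (String × Int)) (new : List (String × Int)) : Bool :=
  let dOld := PySem.Dict.ofList old
  let dNew := PySem.Dict.ofList new
  -- 'for code in new.keys() | old.keys(): … return False / return True' is an all-loop;
  -- the set union is iterated as Set.ofList (result is order-independent)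
  (PySem.Set.ofList (dNew.keys ++ dOld.keys)).all (fun code =>
    pyOrZero (dOld.get? code) == pyOrZero (dNew.get? code))

-- ===== PORT B =====
-- {k: v for k, v in d.items() if v}
def pvNorm (d : PySem.Dict String Int) : PySem.Dict String Int :=
  PySem.Dict.mk (d.items.filter (fun p => !(p.2 == 0)))

def compare_activity_change_values_py_alt (old : List (String × Int)) (new : List (String × Int)) : Bool :=
  let norm_old := pvNorm (PySem.Dict.ofList old)
  let norm_new := pvNorm (PySem.Dict.ofList new)
  -- Python's dict '==' ignores order: ported exactly as mutual lookup agreement (keys are unique)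
  norm_old.items.all (fun p => norm_new.get? p.1 == some p.2) &&
    norm_new.items.all (fun p => norm_old.get? p.1 == some p.2)

-- ===== PRECONDITION & SPEC =====
def Spec_compare_activity_change_values_py (old : List (String × Int)) (new : List (String × Int)) (out : Bool) : Prop := out = compare_activity_change_values_py_alt old new
instance (old : List (String × Int)) (new : List (String × Int)) (out : Bool) : Decidable (Spec_compare_activity_change_values_py old new out) := by unfold Spec_compare_activity_change_values_py; infer_instance

-- ===== CLAIM (what is proved, stated in full; the proofs are below) =====
def Claim_equal_compare_activity_change_values_py : Prop := ∀ (old : List (String × Int)) (new : List (String × Int)), Dom_compare_activity_change_values_py old new → Spec_compare_activity_change_values_py old new (compare_activity_change_values_py old new)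

-- ===== LEMMAS AND PROOFS =====

-- `x or 0` on a dict lookup is exactly getD with default 0
theorem pyOrZero_get? (d : PySem.Dict String Int) (k : String) :
    pyOrZero (d.get? k) = d.getD k 0 := by
  rw [PySem.Dict.getD_eq_get?_getD]
  cases h : d.get? k with
  | none => rfl
  | some v =>
    simp only [pyOrZero, Option.getD_some]
    split_ifs with hv
    · omega
    · rfl

theorem nodup_keys_pvNorm (d : PySem.Dict String Int) (h : d.keys.Nodup) :
    (pvNorm d).keys.Nodup := by
  simp only [pvNorm, PySem.Dict.keys_mk]
  have : d.keys = d.items.map (·.1) := rfl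
  rw [this] at h
  exact (List.Sublist.map _ List.filter_sublist).nodup h

-- lookup in the normalized dict: exactly the nonzero values of getD
theorem get?_pvNorm (d : PySem.Dict String Int) (h : d.keys.Nodup) (k : String) (v : Int) :
    (pvNorm d).get? k = some v ↔ d.getD k 0 = v ∧ v ≠ 0 := by
  rw [PySem.Dict.get?_eq_some_iff_mem_items _ _ _ (nodup_keys_pvNorm d h)]
  show (k, v) ∈ d.items.filter _ ↔ _
  rw [List.mem_filter]
  rw [← PySem.Dict.get?_eq_some_iff_mem_items _ _ _ h]
  constructor
  · rintro ⟨hg, hv⟩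
    simp only [Bool.not_eq_eq_eq_not, Bool.not_true, beq_eq_false_iff_ne, ne_eq] at hv
    exact ⟨by rw [PySem.Dict.getD_eq_get?_getD, hg]; rfl, hv⟩
  · rintro ⟨hg, hv⟩
    rw [PySem.Dict.getD_eq_get?_getD] at hg
    cases hgk : d.get? k with
    | none => rw [hgk] at hg; exact absurd hg.symm hv
    | some w =>
      rw [hgk] at hg
      simp only [Option.getD_some] at hg
      exact ⟨by rw [hg], by simp [hv]⟩

-- A's result characterized: all lookups (with default 0) agree
theorem portA_iff (old new : List (String × Int)) :
    compare_activity_change_values_py old new = true ↔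
      ∀ k, (PySem.Dict.ofList old).getD k 0 = (PySem.Dict.ofList new).getD k 0 := by
  simp only [compare_activity_change_values_py, List.all_eq_true, beq_iff_eq, pyOrZero_get?]
  constructor
  · intro h k
    by_cases hk : k ∈ PySem.Set.ofList ((PySem.Dict.ofList new).keys ++ (PySem.Dict.ofList old).keys)
    · exact h k hk
    · rw [PySem.Set.mem_ofList, List.mem_append] at hk
      push Not at hk
      have h1 : (PySem.Dict.ofList old).get? k = none :=
        (PySem.Dict.get?_eq_none_iff_not_mem_keys _ _).2 hk.2
      have h2 : (PySem.Dict.ofList new).get? k = none :=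
        (PySem.Dict.get?_eq_none_iff_not_mem_keys _ _).2 hk.1
      rw [PySem.Dict.getD_eq_get?_getD, PySem.Dict.getD_eq_get?_getD, h1, h2]
  · intro h k _
    exact h k

-- B's result characterized the same way
theorem portB_iff (old new : List (String × Int)) :
    compare_activity_change_values_py_alt old new = true ↔
      ∀ k, (PySem.Dict.ofList old).getD k 0 = (PySem.Dict.ofList new).getD k 0 := by
  have hO := PySem.Dict.nodup_keys_ofList old
  have hN := PySem.Dict.nodup_keys_ofList new
  simp only [compare_activity_change_values_py_alt, Bool.and_eq_true, List.all_eq_true,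
    beq_iff_eq]
  constructor
  · rintro ⟨h1, h2⟩ k
    by_cases hf : (PySem.Dict.ofList old).getD k 0 = 0
    · by_cases hg : (PySem.Dict.ofList new).getD k 0 = 0
      · rw [hf, hg]
      · have hm : (pvNorm (PySem.Dict.ofList new)).get? k =
            some ((PySem.Dict.ofList new).getD k 0) :=
          (get?_pvNorm _ hN _ _).2 ⟨rfl, hg⟩
        have := h2 _ ((PySem.Dict.get?_eq_some_iff_mem_items _ _ _
          (nodup_keys_pvNorm _ hN)).1 hm)
        exact ((get?_pvNorm _ hO _ _).1 this).1
    · have hm : (pvNorm (PySem.Dict.ofList old)).get? k =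
          some ((PySem.Dict.ofList old).getD k 0) :=
        (get?_pvNorm _ hO _ _).2 ⟨rfl, hf⟩
      have := h1 _ ((PySem.Dict.get?_eq_some_iff_mem_items _ _ _
        (nodup_keys_pvNorm _ hO)).1 hm)
      exact (((get?_pvNorm _ hN _ _).1 this).1).symm
  · intro h
    constructor
    · intro p hp
      have hg : (pvNorm (PySem.Dict.ofList old)).get? p.1 = some p.2 :=
        (PySem.Dict.get?_eq_some_iff_mem_items _ _ _ (nodup_keys_pvNorm _ hO)).2 hp
      obtain ⟨hv, hnz⟩ := (get?_pvNorm _ hO _ _).1 hg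
      exact (get?_pvNorm _ hN _ _).2 ⟨(h p.1).symm.trans hv, hnz⟩
    · intro p hp
      have hg : (pvNorm (PySem.Dict.ofList new)).get? p.1 = some p.2 :=
        (PySem.Dict.get?_eq_some_iff_mem_items _ _ _ (nodup_keys_pvNorm _ hN)).2 hp
      obtain ⟨hv, hnz⟩ := (get?_pvNorm _ hN _ _).1 hg
      exact (get?_pvNorm _ hO _ _).2 ⟨(h p.1).trans hv, hnz⟩

-- ===== VERDICT (by name: the statement is the Claim_ definition above) =====
theorem compare_activity_change_values_py_spec : Claim_equal_compare_activity_change_values_py := by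
  intro old new _
  show compare_activity_change_values_py old new = compare_activity_change_values_py_alt old new
  rw [Bool.eq_iff_iff, portA_iff, portB_iff]
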